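-- pv_equiv track=rewrite | github.com/KIT-TVA/quantum-pattern-detector | detectors.py | _bin_index_to_decimal
-- ===== SOURCE A (Python) =====
-- def _bin_index_to_decimal(index_list: list, num_of_qubits: int) -> int:
--
--     binary_list: list = []
--     for qubit in range(0, num_of_qubits):
--         if qubit in index_list:
--             binary_list.append(1)
--         else:
--             binary_list.append(0)
--
--     return sum(val*(2**idx) for idx, val in enumerate(binary_list))
-- ===== SOURCE B (Python) =====
-- def _bin_index_to_decimal(index_list: list, num_of_qubits: int) -> int:
--     result = 0
--     for i in index_list:
--         if 0 <= i < num_of_qubits: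
--             result |= 1 << i
--     return result
-- ===== Notes on version B (the rewrite author's own statement) =====
-- stated objective: faster
-- what changed: B iterates over the given indices OR-ing 1<<i into an accumulator instead of scanning every qubit position, testing list membership, building a 0/1 list and summing weighted powers.
import Mathlib
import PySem

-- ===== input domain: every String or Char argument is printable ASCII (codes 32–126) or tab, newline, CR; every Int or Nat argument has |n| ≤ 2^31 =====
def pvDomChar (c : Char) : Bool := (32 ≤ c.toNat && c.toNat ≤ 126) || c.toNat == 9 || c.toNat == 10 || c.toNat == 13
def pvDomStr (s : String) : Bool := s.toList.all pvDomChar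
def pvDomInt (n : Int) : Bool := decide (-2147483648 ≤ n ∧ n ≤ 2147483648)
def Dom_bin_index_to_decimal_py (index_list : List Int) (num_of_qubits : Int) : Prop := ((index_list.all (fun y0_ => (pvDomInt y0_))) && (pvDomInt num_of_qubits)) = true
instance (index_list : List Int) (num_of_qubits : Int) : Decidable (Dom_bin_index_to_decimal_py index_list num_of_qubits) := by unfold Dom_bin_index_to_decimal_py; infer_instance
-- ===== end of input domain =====

-- B replaces A's scan of every qubit position (membership test, 0/1 list, weighted sum)
-- by a single pass over the given indices OR-ing 1 << i into an accumulator (objective: faster).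

-- ===== PORT A =====
def bin_index_to_decimal_py (index_list : List Int) (num_of_qubits : Int) : Int :=
  let binary_list : List Int :=
    (PySem.List.pyRange 0 num_of_qubits 1).foldl
      (fun bl qubit => if qubit ∈ index_list then bl ++ [(1 : Int)] else bl ++ [(0 : Int)]) []
  ((PySem.List.enumerate binary_list 0).map (fun p => p.2 * 2 ^ p.1.toNat)).sum

-- ===== PORT B =====
def bin_index_to_decimal_py_alt (index_list : List Int) (num_of_qubits : Int) : Int :=
  index_list.foldl
    (fun result i =>
      if 0 ≤ i ∧ i < num_of_qubits then PySem.Int.bor result ((1 : Int) <<< i.toNat) else result)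
    0

-- ===== PRECONDITION & SPEC =====
def Spec_bin_index_to_decimal_py (index_list : List Int) (num_of_qubits : Int) (out : Int) : Prop := out = bin_index_to_decimal_py_alt index_list num_of_qubits
instance (index_list : List Int) (num_of_qubits : Int) (out : Int) : Decidable (Spec_bin_index_to_decimal_py index_list num_of_qubits out) := by unfold Spec_bin_index_to_decimal_py; infer_instance

-- ===== CLAIM (what is proved, stated in full; the proofs are below) =====
def Claim_equal_bin_index_to_decimal_py : Prop := ∀ (index_list : List Int) (num_of_qubits : Int), Dom_bin_index_to_decimal_py index_list num_of_qubits → Spec_bin_index_to_decimal_py index_list num_of_qubits (bin_index_to_decimal_py index_list num_of_qubits)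

-- ===== LEMMAS AND PROOFS =====

/-- The bitmask both programs compute: bit q set iff q < n and q ∈ L. -/
def pvMask (L : List Int) (n : Nat) : Nat :=
  ∑ q ∈ Finset.range n, if (q : Int) ∈ L then 2 ^ q else 0

theorem pvMask_succ (L : List Int) (n : Nat) :
    pvMask L (n + 1) = pvMask L n + (if (n : Int) ∈ L then 2 ^ n else 0) :=
  Finset.sum_range_succ _ n

theorem pvMask_lt (L : List Int) (n : Nat) : pvMask L n < 2 ^ n := by
  induction n with
  | zero => simp [pvMask]
  | succ n ih =>
    rw [pvMask_succ]
    have h2 : (2 : Nat) ^ (n + 1) = 2 ^ n + 2 ^ n := by ring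
    split_ifs <;> omega

theorem pvMask_testBit (L : List Int) (n j : Nat) :
    (pvMask L n).testBit j = (decide (j < n) && decide ((j : Int) ∈ L)) := by
  induction n with
  | zero => simp [pvMask]
  | succ n ih =>
    rw [pvMask_succ]
    by_cases hn : (n : Int) ∈ L
    · rw [if_pos hn, Nat.add_comm]
      rcases lt_trichotomy j n with h | h | h
      · rw [Nat.testBit_two_pow_add_gt h, ih]
        simp [h, Nat.lt_succ_of_lt h]
      · subst h
        rw [Nat.testBit_two_pow_add_eq, Nat.testBit_lt_two_pow (pvMask_lt L j)]
        simp [hn]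
      · have hb : 2 ^ n + pvMask L n < 2 ^ j := by
          have := pvMask_lt L n
          have hle : (2 : Nat) ^ (n + 1) ≤ 2 ^ j := Nat.pow_le_pow_right (by omega) (by omega)
          have h2 : (2 : Nat) ^ (n + 1) = 2 ^ n + 2 ^ n := by ring
          omega
        rw [Nat.testBit_lt_two_pow hb]
        simp; omega
    · rw [if_neg hn, Nat.add_zero, ih]
      by_cases hj : j = n
      · subst hj; simp [hn]
      · have : (j < n) ↔ (j < n + 1) := by omega
        simp [this]

-- A-side: the foldl building binary_list is a map.
theorem pvBuild (L : List Int) (qs : List Int) (acc : List Int) :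
    qs.foldl (fun bl q => if q ∈ L then bl ++ [(1 : Int)] else bl ++ [(0 : Int)]) acc
      = acc ++ qs.map (fun q => if q ∈ L then (1 : Int) else 0) := by
  induction qs generalizing acc with
  | nil => simp
  | cons q qs ih =>
    simp only [List.foldl_cons]
    split_ifs with h <;> simp [h, ih, List.append_assoc]

-- A-side: the enumerated weighted sum of the 0/1 list is the bitmask.
theorem pvASum (L : List Int) (m : Nat) :
    ((PySem.List.enumerate ((List.range m).map (fun (k : Nat) => if (k : Int) ∈ L then (1 : Int) else 0)) 0).map
        (fun p => p.2 * 2 ^ p.1.toNat)).sum = (pvMask L m : Int) := by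
  induction m with
  | zero => simp [pvMask]
  | succ m ih =>
    rw [List.range_succ, List.map_append, PySem.List.enumerate_append, List.map_append,
      List.sum_append, ih]
    have hlen : (((List.range m).map (fun (k : Nat) => if (k : Int) ∈ L then (1 : Int) else 0)).length : Int) = (m : Int) := by
      simp
    rw [hlen, pvMask_succ]
    simp only [List.map_cons, List.map_nil, PySem.List.enumerate_cons, PySem.List.enumerate_nil,
      List.sum_cons, List.sum_nil]
    push_cast
    split_ifs <;> simp [Int.toNat_natCast]

-- B-side: the Int fold is the Nat fold, cast.
theorem pvBFold (nq : Int) (L : List Int) (m : Nat) :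
    L.foldl (fun result i =>
        if 0 ≤ i ∧ i < nq then PySem.Int.bor result ((1 : Int) <<< i.toNat) else result) (m : Int)
      = ((L.foldl (fun r i => if 0 ≤ i ∧ i < nq then r ||| 2 ^ i.toNat else r) m : Nat) : Int) := by
  induction L generalizing m with
  | nil => simp
  | cons i L ih =>
    simp only [List.foldl_cons]
    by_cases h : 0 ≤ i ∧ i < nq
    · rw [if_pos h, if_pos h]
      have hcast : PySem.Int.bor (m : Int) ((1 : Int) <<< i.toNat) = ((m ||| 2 ^ i.toNat : Nat) : Int) := by
        rw [Int.shiftLeft_eq, one_mul]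
        have : ((2 : Int) ^ i.toNat) = ((2 ^ i.toNat : Nat) : Int) := by push_cast; ring
        rw [this, PySem.Int.bor_natCast]
      rw [hcast, ih]
    · rw [if_neg h, if_neg h, ih]

-- B-side: testBit characterisation of the Nat fold.
theorem pvBFold_testBit (nq : Int) (L : List Int) (m j : Nat) :
    (L.foldl (fun r i => if 0 ≤ i ∧ i < nq then r ||| 2 ^ i.toNat else r) m).testBit j
      = (m.testBit j || (decide ((j : Int) < nq) && decide ((j : Int) ∈ L))) := by
  induction L generalizing m with
  | nil => simp
  | cons i L ih =>
    simp only [List.foldl_cons]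
    rw [ih]
    by_cases hji : (j : Int) = i
    · by_cases h : 0 ≤ i ∧ i < nq
      · rw [if_pos h, Nat.testBit_lor, Nat.testBit_two_pow]
        have h1 : i.toNat = j := by omega
        have h2 : (j : Int) < nq := by omega
        subst hji
        simp [h2]
      · rw [if_neg h]
        have h2 : ¬ ((j : Int) < nq) := by
          have : (0 : Int) ≤ j := Int.natCast_nonneg j
          omega
        simp [h2]
    · by_cases h : 0 ≤ i ∧ i < nq
      · rw [if_pos h, Nat.testBit_lor, Nat.testBit_two_pow]
        have h1 : ¬ (i.toNat = j) := by omega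
        simp [h1, List.mem_cons, hji]
      · rw [if_neg h]
        simp [List.mem_cons, hji]

theorem pvB_eq_mask (L : List Int) (nq : Int) :
    bin_index_to_decimal_py_alt L nq = (pvMask L nq.toNat : Int) := by
  unfold bin_index_to_decimal_py_alt
  have h := pvBFold nq L 0
  simp only [Nat.cast_zero] at h
  rw [h]
  congr 1
  apply Nat.eq_of_testBit_eq
  intro j
  rw [pvBFold_testBit, pvMask_testBit, Nat.zero_testBit]
  have hiff : ((j : Int) < nq) ↔ (j < nq.toNat) := by omega
  rw [Bool.false_or]
  congr 1
  exact decide_eq_decide.mpr hiff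

theorem pvA_eq_mask (L : List Int) (nq : Int) :
    bin_index_to_decimal_py L nq = (pvMask L nq.toNat : Int) := by
  unfold bin_index_to_decimal_py
  rw [PySem.List.pyRange_one, pvBuild, List.nil_append, List.map_map, Int.sub_zero]
  have hfun : ((fun q => if q ∈ L then (1 : Int) else 0) ∘ (fun k => (0 : Int) + (k : Nat)))
      = (fun (k : Nat) => if (k : Int) ∈ L then (1 : Int) else 0) := by
    funext k
    simp
  rw [hfun]
  exact pvASum L nq.toNat

-- ===== VERDICT (by name: the statement is the Claim_ definition above) =====
theorem bin_index_to_decimal_py_spec : Claim_equal_bin_index_to_decimal_py := by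
  intro index_list num_of_qubits _
  unfold Spec_bin_index_to_decimal_py
  rw [pvA_eq_mask, pvB_eq_mask]
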